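-- pv_equiv track=rewrite | github.com/Sophie10001b/cute_learning | swizzle_viz.py | _linear_offset
-- ===== SOURCE A (Python) =====
-- def _linear_offset(shape: list[int], index: list[int]) -> int:
--     if len(index) != len(shape):
--         raise ValueError(f"idx rank mismatch: got {len(index)}, expected {len(shape)}")
--     for i, (v, d) in enumerate(zip(index, shape)):
--         if v < 0 or v >= d:
--             raise ValueError(f"idx[{i}] out of range: {v} not in [0, {d})")
--     stride = 1
--     off = 0
--     for v, d in zip(reversed(index), reversed(shape)):
--         off += v * stride
--         stride *= d
--     return int(off)
-- ===== SOURCE B (Python) =====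
-- def _linear_offset(shape: list[int], index: list[int]) -> int:
--     if len(index) != len(shape):
--         raise ValueError(f"idx rank mismatch: got {len(index)}, expected {len(shape)}")
--     for i, (v, d) in enumerate(zip(index, shape)):
--         if not (0 <= v < d):
--             raise ValueError(f"idx[{i}] out of range: {v} not in [0, {d})")
--     return _offset_rec(shape[::-1], index[::-1])
--
--
-- def _offset_rec(rshape: list[int], rindex: list[int]) -> int:
--     # fastest-varying dimension first: off = v0 + d0 * (offset of the remaining dims)
--     if not rshape:
--         return 0
--     return rindex[0] + rshape[0] * _offset_rec(rshape[1:], rindex[1:])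
-- ===== Notes on version B (the rewrite author's own statement) =====
-- stated objective: alternative
-- what changed: Replaced the iterative reverse loop maintaining two accumulators (off, stride) by a structural recursion on the reversed lists with no stride variable: off = v0 + d0 * (recursive offset of the remaining dimensions).
import Mathlib
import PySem

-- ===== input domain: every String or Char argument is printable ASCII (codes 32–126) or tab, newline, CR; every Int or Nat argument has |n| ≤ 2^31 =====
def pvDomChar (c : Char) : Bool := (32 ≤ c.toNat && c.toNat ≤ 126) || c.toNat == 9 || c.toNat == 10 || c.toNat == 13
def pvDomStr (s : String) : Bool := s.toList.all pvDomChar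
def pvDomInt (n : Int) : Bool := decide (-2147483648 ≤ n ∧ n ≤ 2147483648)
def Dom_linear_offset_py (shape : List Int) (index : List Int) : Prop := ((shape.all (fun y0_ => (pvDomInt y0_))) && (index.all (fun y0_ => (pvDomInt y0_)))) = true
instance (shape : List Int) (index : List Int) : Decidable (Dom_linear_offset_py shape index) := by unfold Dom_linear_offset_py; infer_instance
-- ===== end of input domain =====

-- B replaces A's two-accumulator reverse stride loop by a stride-free structural recursion on the reversed lists; same value, same cost.

-- ===== PORT A =====
-- Raise branches (rank mismatch, out-of-range component) are excluded by Pre_; the port returns 0 there.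
def linear_offset_py (shape : List Int) (index : List Int) : Int :=
  if index.length ≠ shape.length then 0
  else if (index.zip shape).any (fun vd => decide (vd.1 < 0) || decide (vd.1 ≥ vd.2)) then 0
  else
    ((index.reverse.zip shape.reverse).foldl
      (fun (so : Int × Int) (vd : Int × Int) => (so.1 * vd.2, so.2 + vd.1 * so.1)) (1, 0)).2

-- ===== PORT B =====
-- _offset_rec: recursion on the heads of the reversed lists.  The (_ :: _, []) case is
-- unreachable under Pre_ (Python would raise IndexError there); the port returns 0.
def pvOffsetRec : List Int → List Int → Int
  | [], _ => 0
  | _ :: _, [] => 0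
  | d :: ds, v :: vs => v + d * pvOffsetRec ds vs

def linear_offset_py_alt (shape : List Int) (index : List Int) : Int :=
  if index.length ≠ shape.length then 0
  else if (index.zip shape).any (fun vd => !(decide (0 ≤ vd.1) && decide (vd.1 < vd.2))) then 0
  else pvOffsetRec shape.reverse index.reverse  -- shape[::-1] / index[::-1]

-- ===== PRECONDITION & SPEC =====
-- Pre_ excludes exactly the inputs where A raises ValueError: rank mismatch or an index component out of [0, d).
def Pre_linear_offset_py (shape : List Int) (index : List Int) : Prop :=
  index.length = shape.length ∧ ∀ p ∈ index.zip shape, 0 ≤ p.1 ∧ p.1 < p.2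
instance (shape : List Int) (index : List Int) : Decidable (Pre_linear_offset_py shape index) := by unfold Pre_linear_offset_py; infer_instance

def pvWitness_linear_offset_py : List Int × List Int := ([2, 3, 4], [1, 2, 3])

def Spec_linear_offset_py (shape : List Int) (index : List Int) (out : Int) : Prop := out = linear_offset_py_alt shape index
instance (shape : List Int) (index : List Int) (out : Int) : Decidable (Spec_linear_offset_py shape index out) := by unfold Spec_linear_offset_py; infer_instance

-- ===== CLAIM (what is proved, stated in full; the proofs are below) =====
def Claim_equal_linear_offset_py : Prop := ∀ (shape : List Int) (index : List Int), Dom_linear_offset_py shape index → Pre_linear_offset_py shape index → Spec_linear_offset_py shape index (linear_offset_py shape index)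

-- ===== LEMMAS AND PROOFS =====

-- A's reverse fold with a general accumulator, expressed through the recursion pvOffsetRec.
theorem pv_fold_eq_rec (rv rd : List Int) (h : rv.length = rd.length) (s o : Int) :
    (rv.zip rd).foldl
        (fun (so : Int × Int) (vd : Int × Int) => (so.1 * vd.2, so.2 + vd.1 * so.1)) (s, o)
      = (s * rd.prod, o + s * pvOffsetRec rd rv) := by
  induction rv generalizing rd s o with
  | nil =>
    cases rd with
    | nil => simp [pvOffsetRec]
    | cons d ds => simp at h
  | cons v vs ih =>
    cases rd with
    | nil => simp at h
    | cons d ds =>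
      have hl : vs.length = ds.length := by simpa using h
      simp only [List.zip_cons_cons, List.foldl_cons, ih ds hl, List.prod_cons, pvOffsetRec,
        Prod.mk.injEq]
      constructor <;> ring

-- ===== VERDICT (by name: the statement is the Claim_ definition above) =====
theorem linear_offset_py_spec : Claim_equal_linear_offset_py := by
  intro shape index _ hpre
  obtain ⟨hlen, hrange⟩ := hpre
  have hA : (index.zip shape).any (fun vd => decide (vd.1 < 0) || decide (vd.1 ≥ vd.2)) = false := by
    simp only [List.any_eq_false]
    intro p hp
    obtain ⟨h0, h1⟩ := hrange p hp
    simp; omega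
  have hB : (index.zip shape).any (fun vd => !(decide (0 ≤ vd.1) && decide (vd.1 < vd.2))) = false := by
    simp only [List.any_eq_false]
    intro p hp
    obtain ⟨h0, h1⟩ := hrange p hp
    simp; omega
  unfold Spec_linear_offset_py linear_offset_py linear_offset_py_alt
  rw [if_neg (by simp [hlen]), if_neg (by rw [hA]; simp),
      if_neg (by simp [hlen]), if_neg (by rw [hB]; simp),
      pv_fold_eq_rec _ _ (by simp [hlen])]
  ring
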